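-- pv_equiv track=rewrite | github.com/threemonks/leetcode | lc1830_minimum-number-of-operations-to-make-string-sorted.py | makeStringSorted
-- ===== SOURCE A (Python) =====
-- import math
--
-- def makeStringSorted(s: str) -> int:
--     MOD = 10 ** 9 + 7
--     n = len(s)
--
--     ans = 0
--     cnt = [0] * 26  # total 26 chars
--     for i in range(n - 1, -1, -1):  # iterate back, so we know the chars and counts after i-th position
--         idx = ord(s[i]) - ord('a')
--         cnt[idx] += 1
--         smaller = sum(cnt[:idx])  # number of elements smaller than current one
--         ans += smaller * math.factorial(n - i - 1) // math.prod([math.factorial(cnt[i]) for i in range(26)])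
--         ans %= MOD
--
--     return ans
-- ===== SOURCE B (Python) =====
-- def makeStringSorted(s: str) -> int:
--     MOD = 10 ** 9 + 7
--     cnt = [0] * 26
--     denom = 1   # running product of factorials of the counts
--     f = 1       # factorial of the number of characters processed so far
--     seen = 0
--     ans = 0
--     for ch in reversed(s):
--         idx = ord(ch) - ord('a')
--         cnt[idx] += 1
--         denom *= cnt[idx]
--         ans = (ans + sum(cnt[:idx]) * f // denom) % MOD
--         seen += 1
--         f *= seen
--     return ans
-- ===== Notes on version B (the rewrite author's own statement) =====
-- stated objective: faster
-- what changed: A recomputes factorial(n-i-1) from scratch and rebuilds all 26 count-factorials and their product at every step; B iterates over reversed(s) once, maintaining a running factorial and an incrementally updated product-of-count-factorials denominator, so no factorial is ever recomputed.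
import Mathlib
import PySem

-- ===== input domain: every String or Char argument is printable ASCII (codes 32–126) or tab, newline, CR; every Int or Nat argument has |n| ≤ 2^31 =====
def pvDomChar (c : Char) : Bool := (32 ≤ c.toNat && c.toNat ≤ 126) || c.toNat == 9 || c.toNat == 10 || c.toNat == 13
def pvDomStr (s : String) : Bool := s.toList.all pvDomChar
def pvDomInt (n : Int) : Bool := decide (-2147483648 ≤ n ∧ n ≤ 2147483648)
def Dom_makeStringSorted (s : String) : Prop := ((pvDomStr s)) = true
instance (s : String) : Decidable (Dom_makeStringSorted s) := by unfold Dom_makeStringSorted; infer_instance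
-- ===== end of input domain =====

-- B replaces A's per-step recomputation of factorial(n-i-1) and of all 26 count-factorials by a
-- running factorial and an incrementally maintained denominator product (objective: faster, constant-factor/op-count).

-- ===== PORT A =====
-- math.factorial; exact for m ≥ 0, which holds at every call site admitted by Pre_
def mathFactorial (m : Int) : Int := ((Int.toNat m).factorial : Int)

-- loop body of A: state (ans, cnt), iterated over i = n-1, …, 0
def stepA (cs : List Char) (n : Int) (st : Int × List Int) (i : Int) : Int × List Int :=
  let idx : Int := ((PySem.List.pyGetD cs i 'a').toNat : Int) - 97
  let cnt := PySem.List.pySetD st.2 idx (PySem.List.pyGetD st.2 idx 0 + 1)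
  let smaller := (PySem.List.slice cnt none (some idx)).sum
  let ans := PySem.Int.mod (st.1 + PySem.Int.floordiv (smaller * mathFactorial (n - i - 1))
      (((PySem.List.pyRange 0 26 1).map (fun j => mathFactorial (PySem.List.pyGetD cnt j 0))).prod)) (10 ^ 9 + 7)
  (ans, cnt)

def makeStringSorted (s : String) : Int :=
  let cs := s.toList
  let n : Int := PySem.List.len cs
  ((PySem.List.pyRange (n - 1) (-1) (-1)).foldl (stepA cs n) (0, List.replicate 26 0)).1

-- ===== PORT B =====
-- loop body of B: state (cnt, denom, f, seen, ans), iterated over the characters of reversed(s)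
def stepB (st : List Int × Int × Int × Int × Int) (ch : Char) : List Int × Int × Int × Int × Int :=
  match st with
  | (cnt0, denom0, f, seen, ans) =>
    let idx : Int := (ch.toNat : Int) - 97
    let cnt := PySem.List.pySetD cnt0 idx (PySem.List.pyGetD cnt0 idx 0 + 1)
    let denom := denom0 * PySem.List.pyGetD cnt idx 0
    let ans := PySem.Int.mod (ans + PySem.Int.floordiv ((PySem.List.slice cnt none (some idx)).sum * f) denom) (10 ^ 9 + 7)
    (cnt, denom, f * (seen + 1), seen + 1, ans)

def makeStringSorted_alt (s : String) : Int :=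
  (s.toList.reverse.foldl stepB (List.replicate 26 0, 1, 1, 0, 0)).2.2.2.2

-- ===== PRECONDITION & SPEC =====
-- Pre_ excludes strings containing a character whose code lies outside [71,122]: on those both
-- Pythons raise IndexError (cnt has 26 slots, so ord(c)-97 falls outside Python's valid index
-- range [-26,25]). Pre_ admits every input on which A returns.
def Pre_makeStringSorted (s : String) : Prop :=
  (s.toList.all (fun c => 71 ≤ c.toNat && c.toNat ≤ 122)) = true
instance (s : String) : Decidable (Pre_makeStringSorted s) := by unfold Pre_makeStringSorted; infer_instance
def pvWitness_makeStringSorted : String := "cba"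

def Spec_makeStringSorted (s : String) (out : Int) : Prop := out = makeStringSorted_alt s
instance (s : String) (out : Int) : Decidable (Spec_makeStringSorted s out) := by unfold Spec_makeStringSorted; infer_instance

-- ===== CLAIM (what is proved, stated in full; the proofs are below) =====
def Claim_equal_makeStringSorted : Prop := ∀ (s : String), Dom_makeStringSorted s → Pre_makeStringSorted s → Spec_makeStringSorted s (makeStringSorted s)

-- ===== LEMMAS AND PROOFS =====

-- product of the factorials of the 26 counters — the loop invariant value of B's `denom`
def prodFact (l : List Int) : Int := (l.map mathFactorial).prod

-- the nonnegative list index Python's possibly-negative index idx denotes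
def normIdx (n : Nat) (idx : Int) : Nat := if 0 ≤ idx then idx.toNat else n - (-idx).toNat

theorem pyIdx?_eq_normIdx (n : Nat) (idx : Int) (h1 : -(n : Int) ≤ idx) (h2 : idx < (n : Int)) :
    PySem.List.pyIdx? n idx = some (normIdx n idx) := by
  simp only [PySem.List.pyIdx?, normIdx]
  rcases Int.lt_or_le idx 0 with h | h
  · rw [if_neg (by omega), if_pos (by omega), if_neg (by omega)]
  · rw [if_pos h, if_pos (by omega), if_pos h]

theorem normIdx_lt (n : Nat) (idx : Int) (h1 : -(n : Int) ≤ idx) (h2 : idx < (n : Int)) :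
    normIdx n idx < n := by
  unfold normIdx; split_ifs <;> omega

theorem pyGetD_norm {α : Type} (l : List α) (idx : Int) (d : α)
    (h1 : -(l.length : Int) ≤ idx) (h2 : idx < (l.length : Int)) :
    PySem.List.pyGetD l idx d = l.getD (normIdx l.length idx) d := by
  simp [PySem.List.pyGetD, PySem.List.pyGet?, pyIdx?_eq_normIdx _ _ h1 h2, List.getD]

theorem pySetD_norm {α : Type} (l : List α) (idx : Int) (v : α)
    (h1 : -(l.length : Int) ≤ idx) (h2 : idx < (l.length : Int)) :
    PySem.List.pySetD l idx v = l.set (normIdx l.length idx) v := by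
  simp [PySem.List.pySetD, PySem.List.pySet?, pyIdx?_eq_normIdx _ _ h1 h2]

theorem mathFactorial_succ (x : Int) (hx : 0 ≤ x) :
    mathFactorial (x + 1) = mathFactorial x * (x + 1) := by
  unfold mathFactorial
  have h : (x + 1).toNat = x.toNat + 1 := by omega
  rw [h, Nat.factorial_succ]
  push_cast
  rw [Int.toNat_of_nonneg hx]
  ring

theorem prodFact_set (l : List Int) (j : Nat) (hj : j < l.length) (h0 : 0 ≤ l.getD j 0) :
    prodFact (l.set j (l.getD j 0 + 1)) = prodFact l * (l.getD j 0 + 1) := by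
  induction l generalizing j with
  | nil => simp at hj
  | cons x tl ih =>
    cases j with
    | zero =>
      simp only [List.getD_cons_zero, List.set_cons_zero, prodFact, List.map_cons, List.prod_cons] at *
      rw [mathFactorial_succ x h0]; ring
    | succ j =>
      have hj' : j < tl.length := by simp only [List.length_cons] at hj; omega
      simp only [List.getD_cons_succ] at h0
      have ih' := ih j hj' h0
      simp only [prodFact] at ih'
      simp only [List.getD_cons_succ, List.set_cons_succ, prodFact, List.map_cons, List.prod_cons]
      rw [ih']; ring

-- A's per-step denominator (the mapped pyRange over the 26 counters) is prodFact
theorem denomA_eq (cnt : List Int) (hl : cnt.length = 26) :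
    ((PySem.List.pyRange 0 26 1).map (fun j => mathFactorial (PySem.List.pyGetD cnt j 0))).prod
      = prodFact cnt := by
  have h : (PySem.List.pyRange 0 (PySem.List.len cnt) 1).map (fun j => PySem.List.pyGetD cnt j 0) = cnt :=
    PySem.List.map_pyGetD_pyRange_zero cnt 0
  have hlen : (PySem.List.len cnt) = (26 : Int) := by simp [hl]
  rw [hlen] at h
  rw [show (fun j => mathFactorial (PySem.List.pyGetD cnt j 0))
        = mathFactorial ∘ (fun j => PySem.List.pyGetD cnt j 0) from rfl,
    ← List.map_map, h]
  rfl

-- the two loops, run over the last k characters, produce the same answer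
theorem loopAB (cs : List Char) (hpre : ∀ c ∈ cs, 71 ≤ c.toNat ∧ c.toNat ≤ 122) :
    ∀ (k : Nat), k ≤ cs.length → ∀ (ans : Int) (cnt : List Int) (denom f : Int),
    cnt.length = 26 → (∀ x ∈ cnt, 0 ≤ x) → denom = prodFact cnt →
    f = ((cs.length - k).factorial : Int) →
    ((PySem.List.pyRange ((k : Int) - 1) (-1) (-1)).foldl (stepA cs (cs.length : Int)) (ans, cnt)).1
      = ((cs.take k).reverse.foldl stepB (cnt, denom, f, ((cs.length : Int) - (k : Int)), ans)).2.2.2.2 := by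
  intro k
  induction k with
  | zero =>
    intro _ ans cnt denom f _ _ _ _
    rw [PySem.List.pyRange_neg_one_eq_nil (by omega)]
    simp
  | succ k ih =>
    intro hk ans cnt denom f hlen hnn hdenom hf
    have hklt : k < cs.length := by omega
    have hcast : ((k + 1 : Nat) : Int) - 1 = ((k : Nat) : Int) := by push_cast; ring
    rw [hcast, PySem.List.pyRange_neg_one_cons (show (-1 : Int) < ((k : Nat) : Int) by omega)]
    have htake : (cs.take (k + 1)).reverse = cs[k] :: (cs.take k).reverse := by
      rw [List.take_add_one]
      simp [List.getElem?_eq_getElem hklt]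
    rw [htake]
    simp only [List.foldl_cons]
    -- identify the two step results
    have hch : PySem.List.pyGetD cs ((k : Nat) : Int) 'a' = cs[k] := by
      simp [PySem.List.pyGetD_natCast, List.getD_eq_getElem?_getD, List.getElem?_eq_getElem hklt]
    obtain ⟨hc1, hc2⟩ := hpre cs[k] (List.getElem_mem hklt)
    set idx : Int := ((cs[k].toNat : Int)) - 97 with hidx
    have hi1 : -(cnt.length : Int) ≤ idx := by rw [hlen]; omega
    have hi2 : idx < (cnt.length : Int) := by rw [hlen]; omega
    set j : Nat := normIdx cnt.length idx with hj
    have hjlt : j < cnt.length := normIdx_lt _ _ hi1 hi2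
    have hget : PySem.List.pyGetD cnt idx 0 = cnt.getD j 0 := pyGetD_norm _ _ _ hi1 hi2
    have hset : PySem.List.pySetD cnt idx (PySem.List.pyGetD cnt idx 0 + 1)
        = cnt.set j (cnt.getD j 0 + 1) := by rw [hget]; exact pySetD_norm _ _ _ hi1 hi2
    set cnt' : List Int := cnt.set j (cnt.getD j 0 + 1) with hcnt'
    have hlen' : cnt'.length = 26 := by rw [hcnt', List.length_set, hlen]
    have hget0 : 0 ≤ cnt.getD j 0 := by
      rcases Nat.lt_or_ge j cnt.length with h | h
      · rw [List.getD_eq_getElem _ _ h]; exact hnn _ (List.getElem_mem h)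
      · omega
    have hget' : PySem.List.pyGetD cnt' idx 0 = cnt.getD j 0 + 1 := by
      have := pyGetD_norm cnt' idx 0 (by rw [hlen']; rw [hlen] at hi1; exact hi1)
        (by rw [hlen']; rw [hlen] at hi2; exact hi2)
      rw [this]
      have hjeq : normIdx cnt'.length idx = j := by rw [hlen', ← hlen, hj]
      rw [hjeq, hcnt', List.getD_eq_getElem _ _ (by simpa [List.length_set] using hjlt),
        List.getElem_set_self]
    have hnn' : ∀ x ∈ cnt', 0 ≤ x := by
      intro x hx
      rcases List.mem_or_eq_of_mem_set hx with h | h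
      · exact hnn _ h
      · omega
    have hdenom' : denom * PySem.List.pyGetD cnt' idx 0 = prodFact cnt' := by
      rw [hget', hdenom, hcnt', prodFact_set cnt j hjlt hget0]
    have hfact : mathFactorial ((cs.length : Int) - ((k : Nat) : Int) - 1) = f := by
      rw [hf]; unfold mathFactorial
      congr 1
      have : ((cs.length : Int) - ((k : Nat) : Int) - 1).toNat = cs.length - (k + 1) := by omega
      rw [this]
    have hseen : ((cs.length : Int) - ((k + 1 : Nat) : Int)) + 1 = (cs.length : Int) - (k : Nat) := by
      push_cast; ring
    have hf' : f * (((cs.length : Int) - ((k + 1 : Nat) : Int)) + 1)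
        = ((cs.length - k).factorial : Int) := by
      rw [hf, hseen]
      have h1 : cs.length - k = (cs.length - (k + 1)) + 1 := by omega
      have h2 : ((cs.length : Int) - (k : Nat)) = (((cs.length - (k + 1)) + 1 : Nat) : Int) := by
        push_cast; omega
      rw [h1, Nat.factorial_succ, h2]; push_cast; ring
    -- compute the two step results
    have hstepA : stepA cs (cs.length : Int) (ans, cnt) ((k : Nat) : Int)
        = (PySem.Int.mod (ans + PySem.Int.floordiv ((PySem.List.slice cnt' none (some idx)).sum * f)
            (prodFact cnt')) (10 ^ 9 + 7), cnt') := by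
      simp only [stepA, hch, ← hidx, hset, hfact, denomA_eq cnt' hlen']
    have hstepB : stepB (cnt, denom, f, (cs.length : Int) - ((k + 1 : Nat) : Int), ans) cs[k]
        = (cnt', prodFact cnt', ((cs.length - k).factorial : Int), (cs.length : Int) - ((k : Nat) : Int),
            PySem.Int.mod (ans + PySem.Int.floordiv ((PySem.List.slice cnt' none (some idx)).sum * f)
            (prodFact cnt')) (10 ^ 9 + 7)) := by
      simp only [stepB, ← hidx, hset]
      rw [hdenom', hf', hseen]
    rw [hstepA, hstepB]
    exact ih (by omega) _ cnt' _ _ hlen' hnn' rfl rfl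

-- ===== VERDICT (by name: the statement is the Claim_ definition above) =====
theorem makeStringSorted_spec : Claim_equal_makeStringSorted := by
  intro s _ hpre0
  have hpre : ∀ c ∈ s.toList, 71 ≤ c.toNat ∧ c.toNat ≤ 122 := by
    intro c hc
    have := List.all_eq_true.mp hpre0 c hc
    simpa using this
  show makeStringSorted s = makeStringSorted_alt s
  unfold makeStringSorted makeStringSorted_alt
  simp only [PySem.List.len_eq]
  have h := loopAB s.toList hpre s.toList.length (le_refl _) 0 (List.replicate 26 0) 1 1
    (by simp) (by intro x hx; simp [List.eq_of_mem_replicate hx]) ?_ ?_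
  · simp only [List.take_length, sub_self] at h
    exact h
  · simp [prodFact]
    rfl
  · simp
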